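-- pv_equiv track=rewrite | github.com/gchatrian/scontrini | scontrini-backend/app/utils/product_aggregator.py | detect_duplicate_products
-- ===== SOURCE A (Python) =====
-- from typing import List, Dict, Tuple
--
-- def detect_duplicate_products(items: List[Dict]) -> List[Tuple[int, int]]:
--     """
--     Rileva prodotti duplicati nella lista.
--
--     Args:
--         items: Lista di prodotti
--
--     Returns:
--         Lista di tuple (indice1, indice2) per prodotti duplicati
--     """
--     duplicates = []
--
--     for i in range(len(items)):
--         for j in range(i + 1, len(items)):
--             item1 = items[i]
--             item2 = items[j]
--
--             # Confronta raw_product_name e store_name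
--             if (item1.get('raw_product_name') == item2.get('raw_product_name') and
--                 item1.get('store_name') == item2.get('store_name')):
--                 duplicates.append((i, j))
--
--     return duplicates
-- ===== SOURCE B (Python) =====
-- def detect_duplicate_products(items):
--     """Group indices by (raw_product_name, store_name) once, then emit each
--     index's later group-mates (same output, different algorithm)."""
--     groups = {}
--     for idx, item in enumerate(items):
--         key = (item.get('raw_product_name'), item.get('store_name'))
--         groups.setdefault(key, []).append(idx)
--     duplicates = []
--     for idx, item in enumerate(items):
--         key = (item.get('raw_product_name'), item.get('store_name'))
--         for j in groups[key]:
--             if j > idx: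
--                 duplicates.append((idx, j))
--     return duplicates
-- ===== Notes on version B (the rewrite author's own statement) =====
-- stated objective: alternative
-- what changed: Replaced the all-pairs nested index scan by a single dict pass grouping indices by (raw_product_name, store_name), then emitting each index's later group-mates, which preserves A's (i,j)-major output order without sorting.
import Mathlib
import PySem

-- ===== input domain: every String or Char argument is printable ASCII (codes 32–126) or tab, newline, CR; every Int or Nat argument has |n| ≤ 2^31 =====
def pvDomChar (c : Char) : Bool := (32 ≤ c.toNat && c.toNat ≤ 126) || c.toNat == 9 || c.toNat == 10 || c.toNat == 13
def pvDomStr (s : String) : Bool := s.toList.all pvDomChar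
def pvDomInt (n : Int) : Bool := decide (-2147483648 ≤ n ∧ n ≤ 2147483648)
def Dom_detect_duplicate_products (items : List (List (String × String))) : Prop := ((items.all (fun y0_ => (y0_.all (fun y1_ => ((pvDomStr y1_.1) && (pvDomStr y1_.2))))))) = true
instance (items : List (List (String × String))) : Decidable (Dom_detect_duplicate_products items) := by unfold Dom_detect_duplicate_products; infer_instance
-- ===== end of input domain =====

-- One line: B replaces A's all-pairs nested index scan by one dict pass grouping indices by
-- (raw_product_name, store_name) and then emitting each index's later group-mates (alternative algorithm).

-- ===== PORT A =====
-- A: nested index loops, compare the two .get fields of items[i] and items[j], append (i, j).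
def detect_duplicate_products (items : List (List (String × String))) : List (Int × Int) :=
  (PySem.List.pyRange 0 (items.length : Int) 1).foldl (fun duplicates i =>
    (PySem.List.pyRange (i + 1) (items.length : Int) 1).foldl (fun duplicates j =>
      let item1 := PySem.List.pyGetD items i []
      let item2 := PySem.List.pyGetD items j []
      if (PySem.Dict.mk item1).get? "raw_product_name" = (PySem.Dict.mk item2).get? "raw_product_name" ∧
         (PySem.Dict.mk item1).get? "store_name" = (PySem.Dict.mk item2).get? "store_name" then
        duplicates ++ [(i, j)]
      else duplicates) duplicates) []

-- ===== PORT B =====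
-- B-side helper: the grouping key (item.get('raw_product_name'), item.get('store_name')).
def ddpKey (item : List (String × String)) : Option String × Option String :=
  ((PySem.Dict.mk item).get? "raw_product_name", (PySem.Dict.mk item).get? "store_name")

def detect_duplicate_products_alt (items : List (List (String × String))) : List (Int × Int) :=
  let groups : PySem.Dict (Option String × Option String) (List Int) :=
    (PySem.List.enumerate items 0).foldl (fun groups p =>
      groups.insert (ddpKey p.2) (groups.getD (ddpKey p.2) [] ++ [p.1])) PySem.Dict.empty
  (PySem.List.enumerate items 0).foldl (fun duplicates p =>
    (groups.getD (ddpKey p.2) []).foldl (fun duplicates j =>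
      if p.1 < j then duplicates ++ [(p.1, j)] else duplicates) duplicates) []

-- ===== PRECONDITION & SPEC =====
def Spec_detect_duplicate_products (items : List (List (String × String))) (out : List (Int × Int)) : Prop := out = detect_duplicate_products_alt items
instance (items : List (List (String × String))) (out : List (Int × Int)) : Decidable (Spec_detect_duplicate_products items out) := by unfold Spec_detect_duplicate_products; infer_instance

-- ===== CLAIM (what is proved, stated in full; the proofs are below) =====
def Claim_equal_detect_duplicate_products : Prop := ∀ (items : List (List (String × String))), Dom_detect_duplicate_products items → Spec_detect_duplicate_products items (detect_duplicate_products items)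

-- ===== LEMMAS AND PROOFS =====

-- the key of items[i] (with Python's out-of-range default never hit for i in range)
def keyAt (items : List (List (String × String))) (i : Int) : Option String × Option String :=
  ddpKey (PySem.List.pyGetD items i [])

-- grouping fold: looking up k in the built dict returns the first components of the
-- enumerate pairs whose item has key k, in order
lemma group_fold_getD (l : List (Int × List (String × String)))
    (d : PySem.Dict (Option String × Option String) (List Int))
    (k : Option String × Option String) :
    (l.foldl (fun g p => g.insert (ddpKey p.2) (g.getD (ddpKey p.2) [] ++ [p.1])) d).getD k []
      = d.getD k [] ++ (l.filter (fun p => ddpKey p.2 = k)).map (·.1) := by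
  induction l generalizing d with
  | nil => simp
  | cons p t ih =>
    simp only [List.foldl_cons, List.filter_cons, ih]
    by_cases h : ddpKey p.2 = k
    · simp [h]
    · simp [h, PySem.Dict.getD_insert, Ne.symm h]

-- B in closed form
lemma alt_eq_flatMap (items : List (List (String × String))) :
    detect_duplicate_products_alt items
      = (PySem.List.pyRange 0 (items.length : Int) 1).flatMap (fun i =>
          (((PySem.List.pyRange 0 (items.length : Int) 1).filter
              (fun j => keyAt items j = keyAt items i)).filter (fun j => i < j)).map
            (fun j => (i, j))) := by
  unfold detect_duplicate_products_alt
  have hg : ∀ k, ((PySem.List.enumerate items 0).foldl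
        (fun g p => g.insert (ddpKey p.2) (g.getD (ddpKey p.2) [] ++ [p.1]))
        PySem.Dict.empty).getD k []
      = (PySem.List.pyRange 0 (items.length : Int) 1).filter (fun j => keyAt items j = k) := by
    intro k
    rw [group_fold_getD, PySem.List.enumerate_eq_map_pyRange (d := [])]
    simp [List.filter_map, keyAt, Function.comp_def]
    rfl
  trans ((PySem.List.enumerate items 0).foldl (fun duplicates p =>
      duplicates ++ (((PySem.List.pyRange 0 (items.length : Int) 1).filter
          (fun j => keyAt items j = ddpKey p.2)).filter (fun j => p.1 < j)).map
        (fun j => (p.1, j))) [])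
  · apply PySem.List.foldl_congr_mem
    intro acc p _
    rw [hg (ddpKey p.2)]
    rw [PySem.List.foldl_append_ite (p := fun j => p.1 < j) (f := fun j => (p.1, j))]
  · rw [PySem.List.foldl_append_eq_flatMap, PySem.List.enumerate_eq_map_pyRange (d := [])]
    simp [List.flatMap_map, keyAt]
    rfl

-- A in closed form
lemma a_eq_flatMap (items : List (List (String × String))) :
    detect_duplicate_products items
      = (PySem.List.pyRange 0 (items.length : Int) 1).flatMap (fun i =>
          ((PySem.List.pyRange (i + 1) (items.length : Int) 1).filter
              (fun j => keyAt items j = keyAt items i)).map (fun j => (i, j))) := by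
  unfold detect_duplicate_products
  calc (PySem.List.pyRange 0 (items.length : Int) 1).foldl (fun duplicates i =>
        (PySem.List.pyRange (i + 1) (items.length : Int) 1).foldl (fun duplicates j =>
          let item1 := PySem.List.pyGetD items i []
          let item2 := PySem.List.pyGetD items j []
          if (PySem.Dict.mk item1).get? "raw_product_name" = (PySem.Dict.mk item2).get? "raw_product_name" ∧
             (PySem.Dict.mk item1).get? "store_name" = (PySem.Dict.mk item2).get? "store_name" then
            duplicates ++ [(i, j)]
          else duplicates) duplicates) []
      = (PySem.List.pyRange 0 (items.length : Int) 1).foldl (fun duplicates i =>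
          duplicates ++ ((PySem.List.pyRange (i + 1) (items.length : Int) 1).filter
              (fun j => keyAt items j = keyAt items i)).map (fun j => (i, j))) [] := by
        apply PySem.List.foldl_congr_mem
        intro acc i _
        rw [PySem.List.foldl_append_ite
          (p := fun j => (PySem.Dict.mk (PySem.List.pyGetD items i [])).get? "raw_product_name"
                  = (PySem.Dict.mk (PySem.List.pyGetD items j [])).get? "raw_product_name" ∧
                (PySem.Dict.mk (PySem.List.pyGetD items i [])).get? "store_name"
                  = (PySem.Dict.mk (PySem.List.pyGetD items j [])).get? "store_name")
          (f := fun j => (i, j))]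
        congr 1
        refine congrArg _ ?_
        apply List.filter_congr
        intro j _
        simp [keyAt, ddpKey, Prod.ext_iff, eq_comm]
    _ = _ := by rw [PySem.List.foldl_append_eq_flatMap]; exact List.nil_append _

-- per-i: filtering j > i out of the whole range leaves exactly the upper range
lemma upper_range_filter (items : List (List (String × String))) (i : Int)
    (h0 : 0 ≤ i) (hn : i < (items.length : Int)) :
    ((PySem.List.pyRange 0 (items.length : Int) 1).filter
        (fun j => keyAt items j = keyAt items i)).filter (fun j => i < j)
      = (PySem.List.pyRange (i + 1) (items.length : Int) 1).filter
          (fun j => keyAt items j = keyAt items i) := by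
  rw [PySem.List.pyRange_one_append 0 (i + 1) (items.length : Int) (by omega) (by omega)]
  rw [List.filter_append, List.filter_append, List.filter_filter, List.filter_filter]
  have h1 : ((PySem.List.pyRange 0 (i + 1) 1).filter
      (fun j => decide (i < j) && decide (keyAt items j = keyAt items i))) = [] := by
    rw [List.filter_eq_nil_iff]
    intro j hj
    rw [PySem.List.mem_pyRange_one] at hj
    simp only [Bool.and_eq_true, decide_eq_true_eq, not_and]
    intro hlt
    omega
  have h2 : ((PySem.List.pyRange (i + 1) (items.length : Int) 1).filter
      (fun j => decide (i < j) && decide (keyAt items j = keyAt items i)))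
      = (PySem.List.pyRange (i + 1) (items.length : Int) 1).filter
          (fun j => keyAt items j = keyAt items i) := by
    apply List.filter_congr
    intro j hj
    rw [PySem.List.mem_pyRange_one] at hj
    have hij : i < j := by omega
    simp [hij]
  rw [h1, h2]
  exact List.nil_append _

-- ===== VERDICT (by name: the statement is the Claim_ definition above) =====
theorem detect_duplicate_products_spec : Claim_equal_detect_duplicate_products := by
  intro items _
  unfold Spec_detect_duplicate_products
  rw [a_eq_flatMap, alt_eq_flatMap]
  apply List.flatMap_congr
  intro i hi
  rw [PySem.List.mem_pyRange_one] at hi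
  rw [upper_range_filter items i hi.1 hi.2]
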